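-- pv_equiv track=rewrite | github.com/AutoTreeGen/TreeGen | packages/inference-engine/src/inference_engine/detectors/metric_book_ocr.py | _ordered_flags
-- ===== SOURCE A (Python) =====
-- FLAG_MONTH_CONFUSION = "ocr_month_march_may_confusion"
--
-- FLAG_SURNAME_FALSE_VARIANT = "ocr_kamenetsky_kaminsky_false_variant"
--
-- FLAG_GENDER_MISREAD = "metric_book_gender_column_misread"
--
-- FLAG_MOTHER_FALSE_SURNAME = "ocr_rabinovich_raskin_false_mother"
--
-- FLAG_PLACE_JURISDICTION_LOST = "modern_place_normalization_lost_jurisdiction"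
--
-- FLAG_DUPLICATE_PROFILE = "ocr_created_duplicate_profile"
--
-- FLAG_TREE_PROPAGATION = "online_tree_ocr_error_propagation"
--
-- FLAG_PRIMARY_OVERRIDES_DERIVATIVE = "primary_image_overrides_ocr_derivative"
--
-- def _ordered_flags(flags: set[str]) -> list[str]:
--     order = [
--         FLAG_MONTH_CONFUSION,
--         FLAG_SURNAME_FALSE_VARIANT,
--         FLAG_GENDER_MISREAD,
--         FLAG_MOTHER_FALSE_SURNAME,
--         FLAG_PLACE_JURISDICTION_LOST,
--         FLAG_DUPLICATE_PROFILE,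
--         FLAG_TREE_PROPAGATION,
--         FLAG_PRIMARY_OVERRIDES_DERIVATIVE,
--     ]
--     return [flag for flag in order if flag in flags]
-- ===== SOURCE B (Python) =====
-- _RANK = {
--     flag: i
--     for i, flag in enumerate(
--         (
--             "ocr_month_march_may_confusion",
--             "ocr_kamenetsky_kaminsky_false_variant",
--             "metric_book_gender_column_misread",
--             "ocr_rabinovich_raskin_false_mother",
--             "modern_place_normalization_lost_jurisdiction",
--             "ocr_created_duplicate_profile",
--             "online_tree_ocr_error_propagation",
--             "primary_image_overrides_ocr_derivative",
--         )
--     )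
-- }
--
--
-- def _ordered_flags(flags: set[str]) -> list[str]:
--     return sorted((f for f in flags if f in _RANK), key=_RANK.__getitem__)
-- ===== Notes on version B (the rewrite author's own statement) =====
-- stated objective: alternative
-- what changed: Instead of scanning the fixed priority list and testing membership in the input set, B builds a rank dict (flag -> priority index) once, filters the input flags to the known ones, and sorts them by their rank.
import Mathlib
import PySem

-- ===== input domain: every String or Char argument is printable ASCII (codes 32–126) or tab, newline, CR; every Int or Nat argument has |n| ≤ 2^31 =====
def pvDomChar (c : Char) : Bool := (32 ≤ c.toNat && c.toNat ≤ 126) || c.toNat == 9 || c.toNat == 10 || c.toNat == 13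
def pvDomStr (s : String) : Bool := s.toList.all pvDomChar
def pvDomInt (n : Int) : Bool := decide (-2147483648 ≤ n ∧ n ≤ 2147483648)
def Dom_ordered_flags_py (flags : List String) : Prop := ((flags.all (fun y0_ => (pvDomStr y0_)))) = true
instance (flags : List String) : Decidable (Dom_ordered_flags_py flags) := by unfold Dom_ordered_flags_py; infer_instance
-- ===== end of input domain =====

-- One honest line: B replaces A's scan of the fixed priority list (membership-tested
-- against the input set) by filtering the input flags through a rank table and sorting
-- them by rank; equivalence is proved for every duplicate-free flag list (the set encoding).

-- ===== PORT A =====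
-- the module-level FLAG_* constants, in A's priority order (shared literal data, used by both ports)
def ofp_order : List String :=
  ["ocr_month_march_may_confusion",
   "ocr_kamenetsky_kaminsky_false_variant",
   "metric_book_gender_column_misread",
   "ocr_rabinovich_raskin_false_mother",
   "modern_place_normalization_lost_jurisdiction",
   "ocr_created_duplicate_profile",
   "online_tree_ocr_error_propagation",
   "primary_image_overrides_ocr_derivative"]

-- [flag for flag in order if flag in flags]
def ordered_flags_py (flags : List String) : List String :=
  ofp_order.filter (fun flag => flags.contains flag)

-- ===== PORT B =====
-- rank = {flag: i for i, flag in enumerate(order)}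
def ofp_rank : PySem.Dict String Int :=
  (PySem.List.enumerate ofp_order).foldl (fun d p => d.insert p.2 p.1) PySem.Dict.empty

-- sorted((f for f in flags if f in rank), key=rank.__getitem__)
-- (rank[f] is looked up only for keys present in rank, so getD's default is never used)
def ordered_flags_py_alt (flags : List String) : List String :=
  PySem.List.sorted (flags.filter (fun f => (ofp_rank.get? f).isSome))
    (fun f => ofp_rank.getD f 0) false

-- ===== PRECONDITION & SPEC =====
-- The Python parameter is a set[str]; Pre_ states the distinct-elements invariant of its
-- List encoding (it excludes no input the Python function actually receives).
def Pre_ordered_flags_py (flags : List String) : Prop := flags.Nodup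
instance (flags : List String) : Decidable (Pre_ordered_flags_py flags) := by
  unfold Pre_ordered_flags_py; infer_instance

def pvWitness_ordered_flags_py : List String :=
  ["metric_book_gender_column_misread", "ocr_month_march_may_confusion", "not_a_flag"]

def Spec_ordered_flags_py (flags : List String) (out : List String) : Prop := out = ordered_flags_py_alt flags
instance (flags : List String) (out : List String) : Decidable (Spec_ordered_flags_py flags out) := by unfold Spec_ordered_flags_py; infer_instance

-- ===== CLAIM (what is proved, stated in full; the proofs are below) =====
def Claim_equal_ordered_flags_py : Prop := ∀ (flags : List String), Dom_ordered_flags_py flags → Pre_ordered_flags_py flags → Spec_ordered_flags_py flags (ordered_flags_py flags)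

-- ===== LEMMAS AND PROOFS =====

-- membership in the rank dict is membership in the priority list
lemma ofp_rank_isSome (f : String) : (ofp_rank.get? f).isSome = ofp_order.contains f := by
  have h : ofp_rank.items =
    [("ocr_month_march_may_confusion", (0 : Int)),
     ("ocr_kamenetsky_kaminsky_false_variant", 1),
     ("metric_book_gender_column_misread", 2),
     ("ocr_rabinovich_raskin_false_mother", 3),
     ("modern_place_normalization_lost_jurisdiction", 4),
     ("ocr_created_duplicate_profile", 5),
     ("online_tree_ocr_error_propagation", 6),
     ("primary_image_overrides_ocr_derivative", 7)] := by rfl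
  simp only [PySem.Dict.get?, h, List.find?, ofp_order, List.contains_cons, List.contains_nil,
    Bool.beq_eq_decide_eq]
  by_cases h1 : "ocr_month_march_may_confusion" = f <;>
  by_cases h2 : "ocr_kamenetsky_kaminsky_false_variant" = f <;>
  by_cases h3 : "metric_book_gender_column_misread" = f <;>
  by_cases h4 : "ocr_rabinovich_raskin_false_mother" = f <;>
  by_cases h5 : "modern_place_normalization_lost_jurisdiction" = f <;>
  by_cases h6 : "ocr_created_duplicate_profile" = f <;>
  by_cases h7 : "online_tree_ocr_error_propagation" = f <;>
  by_cases h8 : "primary_image_overrides_ocr_derivative" = f <;>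
    simp [h1, h2, h3, h4, h5, h6, h7, h8, eq_comm (a := f)]

-- the rank keys are strictly increasing along the priority list
lemma ofp_order_pairwise :
    ofp_order.Pairwise (fun a b => ofp_rank.getD a 0 < ofp_rank.getD b 0) := by decide

lemma ofp_perm (flags : List String) (hnd : flags.Nodup) :
    (ordered_flags_py flags).Perm (flags.filter (fun f => (ofp_rank.get? f).isSome)) := by
  unfold ordered_flags_py
  rw [List.perm_ext_iff_of_nodup (List.Nodup.filter _ (by decide)) (List.Nodup.filter _ hnd)]
  intro a
  simp [List.mem_filter, ofp_rank_isSome, and_comm]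

-- ===== VERDICT (by name: the statement is the Claim_ definition above) =====
theorem ordered_flags_py_spec : Claim_equal_ordered_flags_py := by
  intro flags _ hnd
  unfold Spec_ordered_flags_py ordered_flags_py_alt
  refine (PySem.List.sorted_eq_of_perm_of_pairwise_lt _ _ _ (ofp_perm flags hnd) ?_).symm
  unfold ordered_flags_py
  exact List.Pairwise.sublist List.filter_sublist ofp_order_pairwise
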